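-- pv_equiv track=rewrite | github.com/callum-jpg/feature_blocks | src/feature_blocks/models/lbp.py | _get_n_features
-- ===== SOURCE A (Python) =====
-- def _get_n_features(radius, method: str = "uniform"):
--     """
--     Calculate the size of the feature vector that lbp_features will return.
--
--     Parameters:
--         radius (int or list of int): Radius or radii for LBP computation.s.
--         method (str): LBP method ('uniform', 'default', 'ror', 'var').
--
--     Returns:
--         int: Total size of the feature vector.
--     """
--     if isinstance(radius, int):
--         radius = [radius]
--
--     n_points = [8 * r for r in radius]
--
--     total_size = 0
--
--     for rad, pts in zip(radius, n_points):
--         # Calculate histogram size based on method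
--         if method == "uniform":
--             hist_size = pts + 2  # uniform patterns + non-uniform
--         elif method in ["default", "ror"]:
--             hist_size = 2**pts
--         elif method == "var":
--             hist_size = 1  # variance method returns single value per pixel, but we histogram it
--             # For variance method, we'd need to know the image to determine bins
--             # This is a limitation - variance method is less predictable
--             raise ValueError(
--                 "Cannot predict feature size for 'var' method without image data"
--             )
--         else:
--             raise ValueError(f"Unknown method: {method}")
--
--         total_size += hist_size
--
--     return total_size
-- ===== SOURCE B (Python) =====
-- def _get_n_features(radius, method: str = "uniform"):
--     if isinstance(radius, int):
--         radius = [radius]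
--     # Aggregate radii as a multiset: histogram size depends only on the radius,
--     # so total = sum over DISTINCT radii of multiplicity * per-radius size.
--     counts = {}
--     for r in radius:
--         counts[r] = counts.get(r, 0) + 1
--     if not counts:
--         return 0
--     if method == "uniform":
--         return sum(c * (8 * r + 2) for r, c in counts.items())
--     if method in ("default", "ror"):
--         return sum(c * 2 ** (8 * r) for r, c in counts.items())
--     if method == "var":
--         raise ValueError(
--             "Cannot predict feature size for 'var' method without image data"
--         )
--     raise ValueError(f"Unknown method: {method}")
-- ===== Notes on version B (the rewrite author's own statement) =====
-- stated objective: alternative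
-- what changed: B aggregates the radii as a multiset: it builds a frequency dict in one pass, then dispatches on method once and returns a weighted sum of multiplicity * per-radius histogram size over the DISTINCT radii, instead of A's per-element loop over zip(radius, n_points) with the branch inside it.
-- outside the precondition, e.g. on _get_n_features([1], 'var'): A raises ValueError, B raises ValueError; on _get_n_features([-1], 'default'): A returns 0.00390625, B returns 0.00390625
import Mathlib
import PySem

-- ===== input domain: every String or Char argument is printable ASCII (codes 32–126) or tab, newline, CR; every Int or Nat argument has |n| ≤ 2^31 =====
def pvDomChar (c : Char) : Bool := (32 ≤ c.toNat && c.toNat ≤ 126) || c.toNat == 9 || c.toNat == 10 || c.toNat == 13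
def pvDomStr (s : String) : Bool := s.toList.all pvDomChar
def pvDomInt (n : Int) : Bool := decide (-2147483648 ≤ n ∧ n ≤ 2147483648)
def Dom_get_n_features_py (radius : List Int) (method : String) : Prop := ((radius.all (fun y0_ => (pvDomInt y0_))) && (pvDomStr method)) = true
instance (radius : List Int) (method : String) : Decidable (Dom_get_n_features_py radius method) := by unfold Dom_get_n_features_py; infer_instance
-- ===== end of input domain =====

-- B aggregates the radii as a frequency dict and returns a multiplicity-weighted sum
-- over the distinct radii (objective: alternative; same asymptotic cost).

-- ===== PORT A =====
-- Port of A: builds n_points = [8*r for r in radius] and folds over zip(radius, n_points),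
-- choosing the histogram size per element inside the loop.  In the 'var'/unknown branches
-- Python raises (excluded by Pre_); the port returns 0 there, a value the claim never touches.
def get_n_features_py (radius : List Int) (method : String) : Int :=
  let n_points := radius.map (fun r => 8 * r)
  (List.zip radius n_points).foldl
    (fun total_size rp =>
      let hist_size : Int :=
        if method = "uniform" then rp.2 + 2
        else if method = "default" ∨ method = "ror" then (2 : Int) ^ rp.2.toNat
        else 0  -- Python raises ValueError here; outside Pre_
      total_size + hist_size) 0

-- ===== PORT B =====
-- Port of B: build counts[r] = counts.get(r, 0) + 1 in one pass, then dispatch on method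
-- once and return the weighted sum  multiplicity * per-radius size  over counts.items().
def get_n_features_py_alt (radius : List Int) (method : String) : Int :=
  let counts : PySem.Dict Int Int :=
    radius.foldl (fun d r => d.insert r (d.getD r 0 + 1)) PySem.Dict.empty
  if counts.items = [] then 0
  else if method = "uniform" then
    (counts.items.map (fun rc => rc.2 * (8 * rc.1 + 2))).sum
  else if method = "default" ∨ method = "ror" then
    (counts.items.map (fun rc => rc.2 * (2 : Int) ^ (8 * rc.1).toNat)).sum
  else 0  -- Python raises ValueError here; outside Pre_

-- ===== PRECONDITION & SPEC =====
-- Pre_ excludes (a) nonempty radius with method 'var' or unknown, where A raises ValueError,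
-- and (b) method 'default'/'ror' with a negative radius, where A returns a float (2**negative),
-- not a value of the declared int type (B returns the same float there).
def Pre_get_n_features_py (radius : List Int) (method : String) : Prop :=
  radius = [] ∨ method = "uniform" ∨
    ((method = "default" ∨ method = "ror") ∧ ∀ r ∈ radius, 0 ≤ r)
instance (radius : List Int) (method : String) : Decidable (Pre_get_n_features_py radius method) := by
  unfold Pre_get_n_features_py; infer_instance
def pvWitness_get_n_features_py : List Int × String := ([1, 2], "uniform")
def Spec_get_n_features_py (radius : List Int) (method : String) (out : Int) : Prop := out = get_n_features_py_alt radius method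
instance (radius : List Int) (method : String) (out : Int) : Decidable (Spec_get_n_features_py radius method out) := by unfold Spec_get_n_features_py; infer_instance

-- ===== CLAIM (what is proved, stated in full; the proofs are below) =====
def Claim_equal_get_n_features_py : Prop := ∀ (radius : List Int) (method : String), Dom_get_n_features_py radius method → Pre_get_n_features_py radius method → Spec_get_n_features_py radius method (get_n_features_py radius method)

-- ===== LEMMAS AND PROOFS =====

-- A's loop shape: folding '+ g (f r)' over zip(l, map f l) sums g ∘ f over l.
theorem fold_zip_map (f g : Int → Int) :
    ∀ (l : List Int) (acc : Int),
      (List.zip l (l.map f)).foldl (fun t rp => t + g rp.2) acc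
        = acc + (l.map (fun r => g (f r))).sum := by
  intro l
  induction l with
  | nil => intro acc; simp
  | cons r rs ih =>
      intro acc
      simp only [List.map_cons, List.zip_cons_cons, List.foldl_cons, List.sum_cons, ih]
      ring

-- Summing 'if k = x then h x else 0' over a nodup list containing x gives h x.
theorem sum_ite_single (h : Int → Int) :
    ∀ (ks : List Int), ks.Nodup → ∀ x ∈ ks,
      (ks.map (fun k => if k = x then h x else 0)).sum = h x := by
  intro ks
  induction ks with
  | nil => intro _ x hx; cases hx
  | cons a as ih =>
      intro hnd x hx
      rcases List.nodup_cons.mp hnd with ⟨ha, hnd'⟩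
      rcases List.mem_cons.mp hx with rfl | hx
      · have hz : (as.map (fun k => if k = x then h x else 0)).sum = 0 := by
          apply List.sum_eq_zero
          intro y hy
          rcases List.mem_map.mp hy with ⟨k, hk, rfl⟩
          have hk' : k ≠ x := by rintro rfl; exact ha hk
          simp [hk']
        simp [hz]
      · have hax : a ≠ x := by rintro rfl; exact ha hx
        simp [hax, ih hnd' x hx]

-- The multiset identity B relies on: a weighted sum over the distinct elements
-- (with multiplicities) equals the plain sum over the list.
theorem weighted_sum (h : Int → Int) :
    ∀ (xs : List Int) (ks : List Int), ks.Nodup → (∀ x ∈ xs, x ∈ ks) →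
      (ks.map (fun k => (xs.count k : Int) * h k)).sum = (xs.map h).sum := by
  intro xs
  induction xs with
  | nil =>
      intro ks _ _
      simp
  | cons x xs ih =>
      intro ks hnd hsub
      have hx : x ∈ ks := hsub x (List.mem_cons_self)
      have hstep : ∀ k, ((x :: xs).count k : Int) * h k
          = (xs.count k : Int) * h k + (if k = x then h x else 0) := by
        intro k
        by_cases hk : k = x
        · subst hk; simp [List.count_cons_self]; ring
        · have hxk : ¬ x = k := fun e => hk e.symm
          simp [hxk, hk]
      calc (ks.map (fun k => ((x :: xs).count k : Int) * h k)).sum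
          = (ks.map (fun k => (xs.count k : Int) * h k
              + (if k = x then h x else 0))).sum := by
            congr 1; exact List.map_congr_left (fun k _ => hstep k)
        _ = (ks.map (fun k => (xs.count k : Int) * h k)).sum
              + (ks.map (fun k => if k = x then h x else 0)).sum := by
            rw [← List.sum_map_add]
        _ = (xs.map h).sum + h x := by
            rw [ih ks hnd (fun y hy => hsub y (List.mem_cons_of_mem _ hy)),
                sum_ite_single h ks hnd x hx]
        _ = ((x :: xs).map h).sum := by simp; ring

-- B's counter fold, via the PySem counter lemmas, sums h over the original list.
theorem alt_sum (h : Int → Int) (radius : List Int) :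
    (((radius.foldl (fun d r => d.insert r (d.getD r 0 + 1)) (PySem.Dict.empty : PySem.Dict Int Int)).items.map
        (fun rc => rc.2 * h rc.1)).sum) = (radius.map h).sum := by
  rw [PySem.Dict.foldl_insert_getD_add_one_eq_counter, PySem.Dict.items_counter]
  rw [List.map_map]
  exact weighted_sum h radius _ (PySem.Set.nodup_ofList radius)
    (fun x hx => (PySem.Set.mem_ofList radius x).mpr hx)

-- counts.items = [] exactly when radius = [].
theorem items_nil_iff (radius : List Int) :
    ((radius.foldl (fun d r => d.insert r (d.getD r 0 + 1)) (PySem.Dict.empty : PySem.Dict Int Int)).items = [])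
      ↔ radius = [] := by
  rw [PySem.Dict.foldl_insert_getD_add_one_eq_counter, PySem.Dict.items_counter]
  constructor
  · intro hmap
    cases radius with
    | nil => rfl
    | cons r rs =>
        exfalso
        have hr : r ∈ PySem.Set.ofList (r :: rs) :=
          (PySem.Set.mem_ofList _ r).mpr List.mem_cons_self
        rw [List.map_eq_nil_iff.mp hmap] at hr
        cases hr
  · rintro rfl; rfl

-- ===== VERDICT (by name: the statement is the Claim_ definition above) =====
theorem get_n_features_py_spec : Claim_equal_get_n_features_py := by
  intro radius method _ hpre
  unfold Spec_get_n_features_py get_n_features_py get_n_features_py_alt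
  by_cases hnil : radius = []
  · subst hnil; rfl
  · rw [if_neg ((items_nil_iff radius).not.mpr hnil)]
    rcases hpre with h | hm | ⟨hm, _⟩
    · exact absurd h hnil
    · subst hm
      simp only [reduceIte]
      rw [fold_zip_map (fun r => 8 * r) (fun x => x + 2),
          alt_sum (fun r => 8 * r + 2) radius]
      simp
    · rcases hm with hm | hm <;> subst hm <;>
      · simp only [String.reduceEq, or_false, false_or, if_true, if_false]
        rw [fold_zip_map (fun r => 8 * r) (fun x => (2 : Int) ^ x.toNat),
            alt_sum (fun r => (2 : Int) ^ (8 * r).toNat) radius]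
        simp
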